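-- pv_equiv track=rewrite | github.com/panpan0000/vllm | .github/workflows/scripts/detect_duplicate_issues.py | _should_drop_code_block
-- ===== SOURCE A (Python) =====
-- ENV_BLOCK_HINTS = {
--     "collecting environment information",
--     "system info",
--     "pytorch info",
--     "python environment",
--     "cuda / gpu info",
--     "cpu info",
--     "the output of python collect_env.py",
-- }
--
-- def _should_drop_code_block(lines: list[str]) -> bool:
--     if not lines:
--         return False
--     block_text = "\n".join(lines).lower()
--     hint_hits = sum(1 for hint in ENV_BLOCK_HINTS if hint in block_text)
--     if hint_hits >= 2:
--         return True
--     return bool(len(lines) >= 60 and hint_hits >= 1)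
-- ===== SOURCE B (Python) =====
-- ENV_BLOCK_HINTS = {
--     "collecting environment information",
--     "system info",
--     "pytorch info",
--     "python environment",
--     "cuda / gpu info",
--     "cpu info",
--     "the output of python collect_env.py",
-- }
--
-- def _should_drop_code_block(lines: list[str]) -> bool:
--     if not lines:
--         return False
--     matched = set()
--     for line in lines:
--         low = line.lower()
--         for hint in ENV_BLOCK_HINTS:
--             if hint in low:
--                 matched.add(hint)
--     if len(matched) >= 2:
--         return True
--     return len(lines) >= 60 and len(matched) >= 1
-- ===== Notes on version B (the rewrite author's own statement) =====
-- stated objective: alternative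
-- what changed: B scans line by line, collecting the set of distinct matched hint phrases per line, instead of joining all lines into one big lowercased string and counting hints over it; valid because hint phrases contain no newline, so any match lies within a single line.
import Mathlib
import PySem

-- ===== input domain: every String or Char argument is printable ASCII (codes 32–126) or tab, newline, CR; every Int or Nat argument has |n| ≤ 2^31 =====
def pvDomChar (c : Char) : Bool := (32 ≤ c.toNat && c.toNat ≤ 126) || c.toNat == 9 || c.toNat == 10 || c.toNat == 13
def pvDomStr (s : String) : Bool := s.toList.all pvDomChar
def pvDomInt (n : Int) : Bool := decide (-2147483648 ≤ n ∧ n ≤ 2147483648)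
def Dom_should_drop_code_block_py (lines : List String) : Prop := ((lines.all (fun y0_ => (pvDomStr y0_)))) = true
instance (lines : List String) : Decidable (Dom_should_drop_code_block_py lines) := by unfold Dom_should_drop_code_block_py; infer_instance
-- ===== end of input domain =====

-- B scans line by line collecting the set of distinct matched hint phrases, instead of
-- joining all lines into one lowercased string and counting hints over it (objective:
-- alternative decomposition; valid because no hint phrase contains a newline).

-- ===== PORT A =====
-- ENV_BLOCK_HINTS (a Python set literal of 7 distinct strings; A only counts matches
-- over it, so the iteration order is irrelevant — ported as the literal's list).
def pvHints : List String :=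
  ["collecting environment information", "system info", "pytorch info",
   "python environment", "cuda / gpu info", "cpu info",
   "the output of python collect_env.py"]

def should_drop_code_block_py (lines : List String) : Bool :=
  match lines with
  | [] => false
  | _ :: _ =>
    let block_text := PySem.Str.lower (PySem.Str.join "\n" lines)
    let hint_hits := pvHints.countP (fun hint => PySem.Str.isIn hint block_text)
    if 2 ≤ hint_hits then true
    else decide (60 ≤ lines.length) && decide (1 ≤ hint_hits)

-- ===== PORT B =====
def pvMatched (lines : List String) : PySem.Set String :=
  lines.foldl (fun matched line =>
    let low := PySem.Str.lower line
    pvHints.foldl (fun matched hint =>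
      if PySem.Str.isIn hint low then PySem.Set.add matched hint else matched) matched)
    PySem.Set.empty

def should_drop_code_block_py_alt (lines : List String) : Bool :=
  match lines with
  | [] => false
  | _ :: _ =>
    let matched := pvMatched lines
    if 2 ≤ PySem.Set.len matched then true
    else decide (60 ≤ lines.length) && decide (1 ≤ PySem.Set.len matched)

-- ===== PRECONDITION & SPEC =====
def Spec_should_drop_code_block_py (lines : List String) (out : Bool) : Prop := out = should_drop_code_block_py_alt lines
instance (lines : List String) (out : Bool) : Decidable (Spec_should_drop_code_block_py lines out) := by unfold Spec_should_drop_code_block_py; infer_instance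

-- ===== CLAIM (what is proved, stated in full; the proofs are below) =====
def Claim_equal_should_drop_code_block_py : Prop := ∀ (lines : List String), Dom_should_drop_code_block_py lines → Spec_should_drop_code_block_py lines (should_drop_code_block_py lines)

-- ===== LEMMAS AND PROOFS =====

-- intercalate step equations (Mathlib has no named equations for `intercalate`)
lemma pv_ic_nil (s : List Char) : List.intercalate s [] = [] := by
  simp [List.intercalate]

lemma pv_ic_single (s x : List Char) : List.intercalate s [x] = x := by
  simp [List.intercalate]

lemma pv_ic_cons2 (s x y : List Char) (zs : List (List Char)) :
    List.intercalate s (x :: y :: zs) = x ++ s ++ List.intercalate s (y :: zs) := by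
  simp [List.intercalate, List.intersperse]

lemma pv_map_intercalate (f : Char → Char) (s : List Char) (xs : List (List Char)) :
    (List.intercalate s xs).map f = List.intercalate (s.map f) (xs.map (List.map f)) := by
  induction xs with
  | nil => simp [pv_ic_nil]
  | cons x rest ih =>
    cases rest with
    | nil => simp [pv_ic_single]
    | cons y zs =>
      simp only [List.map_cons]
      rw [pv_ic_cons2, pv_ic_cons2]
      simp [ih]

lemma pv_prefix_of_prefix_append {α : Type} {h x y : List α}
    (H : h <+: x ++ y) (hl : h.length ≤ x.length) : h <+: x := by
  obtain ⟨t, e⟩ := H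
  have hx : h = x.take h.length := by
    have : h = (x ++ y).take h.length := by
      rw [← e]; simp
    rwa [List.take_append_of_le_length hl] at this
  rw [hx]
  exact List.take_prefix _ _

-- if h contains no `c` and is an infix of `a ++ c :: b`, it lies wholly in `a` or in `b`
lemma pv_infix_split {α : Type} (h a b : List α) (c : α) (hc : c ∉ h)
    (H : h <:+: a ++ c :: b) : h <:+: a ∨ h <:+: b := by
  obtain ⟨s, t, e⟩ := H
  by_cases h1 : s.length + h.length ≤ a.length
  · left
    have e' : s ++ (h ++ t) = a ++ c :: b := by simpa [List.append_assoc] using e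
    have hd : h ++ t = (a ++ c :: b).drop s.length := by
      rw [← e', List.drop_left]
    have hs : s.length ≤ a.length := by omega
    rw [List.drop_append_of_le_length hs] at hd
    have hp : h <+: a.drop s.length ++ c :: b := ⟨t, hd⟩
    have hlen : h.length ≤ (a.drop s.length).length := by simp; omega
    have hpre := pv_prefix_of_prefix_append hp hlen
    exact hpre.isInfix.trans (List.drop_suffix _ _).isInfix
  · by_cases h2 : a.length + 1 ≤ s.length
    · right
      have e' : s ++ (h ++ t) = a ++ c :: b := by simpa [List.append_assoc] using e
      have hd := congrArg (List.drop (a.length + 1)) e'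
      rw [List.drop_append_of_le_length h2] at hd
      have hr : (a ++ c :: b).drop (a.length + 1) = b := by
        rw [show a ++ c :: b = (a ++ [c]) ++ b by simp,
            show a.length + 1 = (a ++ [c]).length by simp]
        exact List.drop_left
      rw [hr] at hd
      exact ⟨s.drop (a.length + 1), t, by simpa [List.append_assoc] using hd⟩
    · exfalso
      apply hc
      have hgc : (a ++ c :: b)[a.length]? = some c := by
        rw [List.getElem?_append_right (le_refl _)]; simp
      rw [← e] at hgc
      have hs : s.length ≤ a.length := by omega
      rw [List.getElem?_append_left (by simp; omega),
          List.getElem?_append_right hs] at hgc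
      exact List.mem_of_getElem? hgc

lemma pv_infix_intercalate (h : List Char) (hne : h ≠ []) (hnl : ('\n' : Char) ∉ h) :
    ∀ (xss : List (List Char)),
      (h <:+: List.intercalate ['\n'] xss ↔ ∃ l ∈ xss, h <:+: l) := by
  intro xss
  induction xss with
  | nil =>
    rw [pv_ic_nil]
    simp [List.infix_nil, hne]
  | cons x rest ih =>
    cases rest with
    | nil => simp [pv_ic_single]
    | cons y zs =>
      rw [pv_ic_cons2]
      constructor
      · intro H
        have H' : h <:+: x ++ '\n' :: List.intercalate ['\n'] (y :: zs) := by
          simpa using H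
        rcases pv_infix_split h x _ '\n' hnl H' with hx | hr
        · exact ⟨x, by simp, hx⟩
        · rcases (ih).mp hr with ⟨l, hl, hi⟩
          exact ⟨l, by simp [hl], hi⟩
      · rintro ⟨l, hl, hi⟩
        rcases List.mem_cons.mp hl with rfl | hl'
        · exact hi.trans ((List.prefix_append _ _).trans (List.prefix_append _ _)).isInfix
        · have hrest : h <:+: List.intercalate ['\n'] (y :: zs) := ih.mpr ⟨l, hl', hi⟩
          exact hrest.trans (List.suffix_append _ _).isInfix

lemma pv_lower_join_toList (lines : List String) :
    (PySem.Str.lower (PySem.Str.join "\n" lines)).toList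
      = List.intercalate ['\n'] (lines.map (fun l => PySem.Chars.lower l.toList)) := by
  rw [PySem.Str.toList_lower, PySem.Str.toList_join]
  show PySem.Chars.lower (PySem.Chars.join "\n".toList (lines.map String.toList))
      = _
  rw [show ("\n" : String).toList = ['\n'] from rfl]
  unfold PySem.Chars.join PySem.Chars.lower
  rw [pv_map_intercalate]
  congr 1
  rw [List.map_map]
  rfl

lemma pv_isIn_join (lines : List String) (h : String)
    (h1 : h.toList ≠ []) (h2 : ('\n' : Char) ∉ h.toList) :
    PySem.Str.isIn h (PySem.Str.lower (PySem.Str.join "\n" lines))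
      = lines.any (fun l => PySem.Str.isIn h (PySem.Str.lower l)) := by
  have key : (PySem.Str.isIn h (PySem.Str.lower (PySem.Str.join "\n" lines)) = true)
      ↔ (lines.any (fun l => PySem.Str.isIn h (PySem.Str.lower l)) = true) := by
    rw [PySem.Str.isIn_iff_infix, pv_lower_join_toList,
        pv_infix_intercalate h.toList h1 h2, List.any_eq_true]
    constructor
    · rintro ⟨l', hl', hi⟩
      rcases List.mem_map.mp hl' with ⟨l, hl, rfl⟩
      refine ⟨l, hl, ?_⟩
      rw [PySem.Str.isIn_iff_infix, PySem.Str.toList_lower]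
      exact hi
    · rintro ⟨l, hl, hi⟩
      rw [PySem.Str.isIn_iff_infix, PySem.Str.toList_lower] at hi
      exact ⟨PySem.Chars.lower l.toList, List.mem_map.mpr ⟨l, hl, rfl⟩, hi⟩
  cases hb : lines.any (fun l => PySem.Str.isIn h (PySem.Str.lower l)) with
  | false =>
    rw [hb] at key
    simpa using key
  | true =>
    rw [hb] at key
    simpa using key

lemma pv_hint_facts : ∀ h ∈ pvHints, h.toList ≠ [] ∧ ('\n' : Char) ∉ h.toList := by
  decide

lemma pv_hints_nodup : pvHints.Nodup := by decide

-- membership in the inner fold over the hints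
lemma pv_mem_inner (low : String) :
    ∀ (hs : List String) (acc : PySem.Set String) (h : String),
      (h ∈ hs.foldl (fun m hint =>
          if PySem.Str.isIn hint low then PySem.Set.add m hint else m) acc) ↔
        (h ∈ acc ∨ (h ∈ hs ∧ PySem.Str.isIn h low = true)) := by
  intro hs
  induction hs with
  | nil => simp
  | cons x xs ih =>
    intro acc h
    simp only [List.foldl_cons]
    rw [ih]
    by_cases hx : PySem.Str.isIn x low = true
    · rw [if_pos hx]
      simp only [PySem.Set.mem_add, List.mem_cons]
      rcases eq_or_ne h x with rfl | hne
      · simp only [hx]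
        tauto
      · tauto
    · rw [if_neg hx]
      simp only [List.mem_cons]
      rcases eq_or_ne h x with rfl | hne
      · constructor
        · tauto
        · rintro (hacc | ⟨_, hP⟩)
          · exact Or.inl hacc
          · exact absurd hP hx
      · tauto

lemma pv_nodup_inner (low : String) :
    ∀ (hs : List String) (acc : PySem.Set String), acc.Nodup →
      (hs.foldl (fun m hint =>
          if PySem.Str.isIn hint low then PySem.Set.add m hint else m) acc).Nodup := by
  intro hs
  induction hs with
  | nil => intro acc hacc; simpa using hacc
  | cons x xs ih =>
    intro acc hacc
    simp only [List.foldl_cons]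
    apply ih
    by_cases hx : PySem.Str.isIn x low = true
    · rw [if_pos hx]; exact PySem.Set.nodup_add acc x hacc
    · rwa [if_neg hx]

lemma pv_mem_fold (h : String) :
    ∀ (ls : List String) (acc : PySem.Set String),
      (h ∈ ls.foldl (fun matched line =>
          let low := PySem.Str.lower line
          pvHints.foldl (fun m hint =>
            if PySem.Str.isIn hint low then PySem.Set.add m hint else m) matched) acc) ↔
        (h ∈ acc ∨ (h ∈ pvHints ∧
          ls.any (fun l => PySem.Str.isIn h (PySem.Str.lower l)) = true)) := by
  intro ls
  induction ls with
  | nil => simp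
  | cons x xs ih =>
    intro acc
    simp only [List.foldl_cons]
    rw [ih, pv_mem_inner]
    simp only [List.any_cons, Bool.or_eq_true]
    tauto

lemma pv_mem_matched (lines : List String) (h : String) :
    h ∈ pvMatched lines ↔
      (h ∈ pvHints ∧ lines.any (fun l => PySem.Str.isIn h (PySem.Str.lower l)) = true) := by
  unfold pvMatched
  rw [pv_mem_fold]
  simp [PySem.Set.empty]

lemma pv_nodup_matched (lines : List String) : (pvMatched lines).Nodup := by
  unfold pvMatched
  induction lines using List.reverseRecOn with
  | nil => simp [PySem.Set.empty]
  | append_singleton xs x ih =>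
    rw [List.foldl_append, List.foldl_cons, List.foldl_nil]
    exact pv_nodup_inner _ _ _ ih

lemma pv_len_matched (lines : List String) :
    (pvMatched lines).length
      = pvHints.countP (fun h => lines.any (fun l => PySem.Str.isIn h (PySem.Str.lower l))) := by
  rw [List.countP_eq_length_filter]
  apply List.Perm.length_eq
  rw [List.perm_ext_iff_of_nodup (pv_nodup_matched lines) (pv_hints_nodup.filter _)]
  intro h
  rw [pv_mem_matched, List.mem_filter]

-- ===== VERDICT (by name: the statement is the Claim_ definition above) =====
theorem should_drop_code_block_py_spec : Claim_equal_should_drop_code_block_py := by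
  unfold Claim_equal_should_drop_code_block_py
  intro lines _
  unfold Spec_should_drop_code_block_py
  cases lines with
  | nil => rfl
  | cons a as =>
    unfold should_drop_code_block_py should_drop_code_block_py_alt
    simp only []
    have hcnt : pvHints.countP
        (fun hint => PySem.Str.isIn hint (PySem.Str.lower (PySem.Str.join "\n" (a :: as))))
        = (pvMatched (a :: as)).length := by
      rw [pv_len_matched]
      apply List.countP_congr
      intro h hh
      rcases pv_hint_facts h hh with ⟨h1, h2⟩
      rw [pv_isIn_join (a :: as) h h1 h2]
    rw [hcnt]
    simp only [PySem.Set.len]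
    set n := (pvMatched (a :: as)).length with hn
    by_cases h2 : 2 ≤ n
    · rw [if_pos h2, if_pos (by exact_mod_cast h2)]
    · rw [if_neg h2, if_neg (by exact_mod_cast h2)]
      congr 1
      by_cases h1 : 1 ≤ n
      · rw [decide_eq_true h1, decide_eq_true (by exact_mod_cast h1)]
      · rw [decide_eq_false h1, decide_eq_false (by exact_mod_cast h1)]
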